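-- pv_equiv track=rewrite | github.com/AlexandraElenaGeorgescu15/architect_ai | components/finetuning_dataset_builder.py | _summarise_artifact_types
-- ===== SOURCE A (Python) =====
-- from typing import Any, Dict, Iterable, List, Optional, Sequence, Set, Tuple
--
-- def _summarise_artifact_types(examples: Iterable[Dict[str, str]]) -> Dict[str, int]:
--     summary: Dict[str, int] = {"code": 0, "erd": 0, "architecture": 0, "api": 0, "ui": 0, "style": 0}
--     for example in examples:
--         instruction = example.get("instruction", "").lower()
--         if "erd" in instruction:
--             summary["erd"] += 1
--         elif "architecture" in instruction:
--             summary["architecture"] += 1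
--         elif "api" in instruction:
--             summary["api"] += 1
--         elif "scss" in instruction or "style" in instruction:
--             summary["style"] += 1
--         elif "angular" in instruction or "component" in instruction:
--             summary["ui"] += 1
--         else:
--             summary["code"] += 1
--     return summary
-- ===== SOURCE B (Python) =====
-- _RULES = (
--     (("erd",), "erd"),
--     (("architecture",), "architecture"),
--     (("api",), "api"),
--     (("scss", "style"), "style"),
--     (("angular", "component"), "ui"),
-- )
--
--
-- def _summarise_artifact_types(examples):
--     # Sieve: repeatedly filter the pool of instruction strings by each rule,
--     # counting the matches removed; whatever survives all rules is "code".
--     pool = [e.get("instruction", "").lower() for e in examples]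
--     counts = {}
--     for keywords, category in _RULES:
--         counts[category] = len([s for s in pool if any(k in s for k in keywords)])
--         pool = [s for s in pool if not any(k in s for k in keywords)]
--     return {"code": len(pool), "erd": counts["erd"], "architecture": counts["architecture"],
--             "api": counts["api"], "ui": counts["ui"], "style": counts["style"]}
-- ===== Notes on version B (the rewrite author's own statement) =====
-- stated objective: alternative
-- what changed: Replaced the single pass that classifies each example with an if/elif cascade and increments dict counters by a staged sieve: the pool of lowercased instructions is filtered once per rule, each stage counting and removing the strings matching that rule's keywords, with the surviving pool counted as 'code'.
import Mathlib
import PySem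

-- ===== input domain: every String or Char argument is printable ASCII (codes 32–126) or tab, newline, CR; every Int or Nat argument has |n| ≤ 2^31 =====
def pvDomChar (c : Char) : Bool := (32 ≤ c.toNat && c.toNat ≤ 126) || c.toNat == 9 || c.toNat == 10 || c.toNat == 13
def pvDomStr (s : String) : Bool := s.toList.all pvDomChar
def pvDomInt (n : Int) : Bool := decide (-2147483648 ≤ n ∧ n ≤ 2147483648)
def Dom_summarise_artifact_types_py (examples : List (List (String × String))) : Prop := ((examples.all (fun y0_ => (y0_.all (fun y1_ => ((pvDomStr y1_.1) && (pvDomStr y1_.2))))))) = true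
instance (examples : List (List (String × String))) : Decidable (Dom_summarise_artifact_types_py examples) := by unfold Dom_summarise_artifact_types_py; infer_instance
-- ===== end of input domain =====

-- B replaces A's single-pass if/elif dict-increment loop with a staged sieve over the pool of
-- lowercased instructions: each rule's stage counts and removes its matches, the survivors are
-- counted as "code" (objective: alternative decomposition, same cost).


-- ===== PORT A =====
def summarise_artifact_types_py (examples : List (List (String × String))) : List (String × Int) :=
  let init : PySem.Dict String Int :=
    (((((PySem.Dict.empty.insert "code" 0).insert "erd" 0).insert "architecture" 0).insert
        "api" 0).insert "ui" 0).insert "style" 0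
  let final := examples.foldl (fun summary ex =>
    let instruction := PySem.Str.lower ((PySem.Dict.mk ex).getD "instruction" "")
    if PySem.Str.isIn "erd" instruction then summary.modify "erd" 0 (· + 1)
    else if PySem.Str.isIn "architecture" instruction then summary.modify "architecture" 0 (· + 1)
    else if PySem.Str.isIn "api" instruction then summary.modify "api" 0 (· + 1)
    else if PySem.Str.isIn "scss" instruction || PySem.Str.isIn "style" instruction then
      summary.modify "style" 0 (· + 1)
    else if PySem.Str.isIn "angular" instruction || PySem.Str.isIn "component" instruction then
      summary.modify "ui" 0 (· + 1)
    else summary.modify "code" 0 (· + 1)) init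
  final.items

-- ===== PORT B =====
def pvRules : List (List String × String) :=
  [(["erd"], "erd"), (["architecture"], "architecture"), (["api"], "api"),
   (["scss", "style"], "style"), (["angular", "component"], "ui")]

def pvHit (keywords : List String) (s : String) : Bool :=
  keywords.any (fun k => PySem.Str.isIn k s)

def summarise_artifact_types_py_alt (examples : List (List (String × String))) : List (String × Int) :=
  let pool0 := examples.map (fun e => PySem.Str.lower ((PySem.Dict.mk e).getD "instruction" ""))
  let st := pvRules.foldl (fun (st : List String × PySem.Dict String Int) r =>
      (st.1.filter (fun s => !pvHit r.1 s),
       st.2.insert r.2 ((st.1.filter (fun s => pvHit r.1 s)).length : Int)))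
      (pool0, PySem.Dict.empty)
  -- counts[c] cannot miss (every rule inserts its own key), so the lookup is exact as getD
  [("code", (st.1.length : Int)),
   ("erd", st.2.getD "erd" 0), ("architecture", st.2.getD "architecture" 0),
   ("api", st.2.getD "api" 0), ("ui", st.2.getD "ui" 0), ("style", st.2.getD "style" 0)]

-- ===== PRECONDITION & SPEC =====
def Spec_summarise_artifact_types_py (examples : List (List (String × String))) (out : List (String × Int)) : Prop := out = summarise_artifact_types_py_alt examples
instance (examples : List (List (String × String))) (out : List (String × Int)) : Decidable (Spec_summarise_artifact_types_py examples out) := by unfold Spec_summarise_artifact_types_py; infer_instance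

-- ===== CLAIM (what is proved, stated in full; the proofs are below) =====
def Claim_equal_summarise_artifact_types_py : Prop := ∀ (examples : List (List (String × String))), Dom_summarise_artifact_types_py examples → Spec_summarise_artifact_types_py examples (summarise_artifact_types_py examples)

-- ===== LEMMAS AND PROOFS =====

-- proof-side classifier: the category A's if/elif cascade picks for one instruction string
def pvCls (s : String) : String :=
  if PySem.Str.isIn "erd" s then "erd"
  else if PySem.Str.isIn "architecture" s then "architecture"
  else if PySem.Str.isIn "api" s then "api"
  else if PySem.Str.isIn "scss" s || PySem.Str.isIn "style" s then "style"
  else if PySem.Str.isIn "angular" s || PySem.Str.isIn "component" s then "ui"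
  else "code"

def pvCategories : List String := ["code", "erd", "architecture", "api", "ui", "style"]

lemma pvCls_mem (s : String) : pvCls s ∈ pvCategories := by
  unfold pvCls pvCategories; split_ifs <;> simp

-- the 6-key dict A's loop maintains, as a literal
def pvMk6 (a b c d e f : Int) : PySem.Dict String Int :=
  PySem.Dict.mk [("code", a), ("erd", b), ("architecture", c), ("api", d), ("ui", e), ("style", f)]

lemma pvStepA_eq (summary : PySem.Dict String Int) (instruction : String) :
    (if PySem.Str.isIn "erd" instruction then summary.modify "erd" 0 (· + 1)
     else if PySem.Str.isIn "architecture" instruction then summary.modify "architecture" 0 (· + 1)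
     else if PySem.Str.isIn "api" instruction then summary.modify "api" 0 (· + 1)
     else if PySem.Str.isIn "scss" instruction || PySem.Str.isIn "style" instruction then
       summary.modify "style" 0 (· + 1)
     else if PySem.Str.isIn "angular" instruction || PySem.Str.isIn "component" instruction then
       summary.modify "ui" 0 (· + 1)
     else summary.modify "code" 0 (· + 1))
    = summary.modify (pvCls instruction) 0 (· + 1) := by
  unfold pvCls; split_ifs <;> rfl

lemma pvModify_mk6 (a b c d e f : Int) (x : String) (hx : x ∈ pvCategories) :
    (pvMk6 a b c d e f).modify x 0 (· + 1)
    = pvMk6 (if x = "code" then a + 1 else a) (if x = "erd" then b + 1 else b)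
            (if x = "architecture" then c + 1 else c) (if x = "api" then d + 1 else d)
            (if x = "ui" then e + 1 else e) (if x = "style" then f + 1 else f) := by
  fin_cases hx <;> simp [pvMk6, PySem.Dict.modify] <;> rfl

lemma pvFold_mk6 (cats : List String) (h : ∀ x ∈ cats, x ∈ pvCategories)
    (a b c d e f : Int) :
    (cats.foldl (fun s x => s.modify x 0 (· + 1)) (pvMk6 a b c d e f)).items
    = [("code", a + cats.count "code"), ("erd", b + cats.count "erd"),
       ("architecture", c + cats.count "architecture"), ("api", d + cats.count "api"),
       ("ui", e + cats.count "ui"), ("style", f + cats.count "style")] := by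
  induction cats generalizing a b c d e f with
  | nil => simp [pvMk6]
  | cons x rest ih =>
    have hx := h x (by simp)
    rw [List.foldl_cons, pvModify_mk6 a b c d e f x hx,
        ih (fun y hy => h y (by simp [hy]))]
    fin_cases hx <;> simp <;> omega

-- each sieve stage's match count is the count of the corresponding first-match category
set_option maxHeartbeats 1600000 in
lemma pvSieve (ss : List String) :
    (ss.filter (fun s => pvHit ["erd"] s)).length = (ss.map pvCls).count "erd"
  ∧ ((ss.filter (fun s => !pvHit ["erd"] s)).filter (fun s => pvHit ["architecture"] s)).length
      = (ss.map pvCls).count "architecture"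
  ∧ (((ss.filter (fun s => !pvHit ["erd"] s)).filter (fun s => !pvHit ["architecture"] s)).filter
        (fun s => pvHit ["api"] s)).length = (ss.map pvCls).count "api"
  ∧ ((((ss.filter (fun s => !pvHit ["erd"] s)).filter (fun s => !pvHit ["architecture"] s)).filter
        (fun s => !pvHit ["api"] s)).filter (fun s => pvHit ["scss", "style"] s)).length
      = (ss.map pvCls).count "style"
  ∧ (((((ss.filter (fun s => !pvHit ["erd"] s)).filter (fun s => !pvHit ["architecture"] s)).filter
        (fun s => !pvHit ["api"] s)).filter (fun s => !pvHit ["scss", "style"] s)).filter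
        (fun s => pvHit ["angular", "component"] s)).length = (ss.map pvCls).count "ui"
  ∧ (((((ss.filter (fun s => !pvHit ["erd"] s)).filter (fun s => !pvHit ["architecture"] s)).filter
        (fun s => !pvHit ["api"] s)).filter (fun s => !pvHit ["scss", "style"] s)).filter
        (fun s => !pvHit ["angular", "component"] s)).length = (ss.map pvCls).count "code" := by
  induction ss with
  | nil => simp
  | cons s t ih =>
    obtain ⟨h1, h2, h3, h4, h5, h6⟩ := ih
    simp only [pvHit, List.any_cons, List.any_nil, Bool.or_false] at *
    cases he : PySem.Str.isIn "erd" s <;>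
    cases har : PySem.Str.isIn "architecture" s <;>
    cases hap : PySem.Str.isIn "api" s <;>
    cases hsc : PySem.Str.isIn "scss" s <;>
    cases hst : PySem.Str.isIn "style" s <;>
    cases han : PySem.Str.isIn "angular" s <;>
    cases hco : PySem.Str.isIn "component" s <;>
    simp [PySem.Str.isIn] at he har hap hsc hst han hco <;>
    simp [pvCls, List.map_cons, he, har, hap, hsc, hst,
      han, hco] at h1 h2 h3 h4 h5 h6 ⊢ <;> omega

-- ===== VERDICT (by name: the statement is the Claim_ definition above) =====
theorem summarise_artifact_types_py_spec : Claim_equal_summarise_artifact_types_py := by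
  intro examples _
  show summarise_artifact_types_py examples = summarise_artifact_types_py_alt examples
  unfold summarise_artifact_types_py summarise_artifact_types_py_alt
  have hinit : (((((PySem.Dict.empty.insert "code" (0:Int)).insert "erd" 0).insert "architecture" 0).insert
        "api" 0).insert "ui" 0).insert "style" 0 = pvMk6 0 0 0 0 0 0 := by decide
  simp only [hinit, pvStepA_eq]
  rw [← List.foldl_map (f := fun ex => PySem.Str.lower ((PySem.Dict.mk ex).getD "instruction" ""))
        (g := fun (s : PySem.Dict String Int) x => s.modify (pvCls x) 0 (· + 1))]
  rw [← List.foldl_map (f := pvCls)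
        (g := fun (s : PySem.Dict String Int) x => s.modify x 0 (· + 1))]
  set pool := examples.map (fun ex => PySem.Str.lower ((PySem.Dict.mk ex).getD "instruction" "")) with hpool
  rw [pvFold_mk6 _ (fun x hx => by obtain ⟨e, _, rfl⟩ := List.mem_map.mp hx; exact pvCls_mem e)]
  obtain ⟨h1, h2, h3, h4, h5, h6⟩ := pvSieve pool
  simp only [List.filter_filter] at h2 h3 h4 h5 h6
  simp only [pvRules, List.foldl_cons, List.foldl_nil]
  simp [PySem.Dict.getD_insert, h1, h2, h3, h4, h5, h6]
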